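-- pv_equiv track=rewrite | github.com/elizatrinityxu-bot/smartshop-ai | product_recommendations/services/review_summary_service.py | extract_summary_only
-- ===== SOURCE A (Python) =====
-- def extract_summary_only(text):
--     lines = text.splitlines()
--     summary_lines = []
--
--     capture = False
--     for line in lines:
--         if line.strip().startswith("Summary:"):
--             capture = True
--             summary_lines.append(line.replace("Summary:", "").strip())
--             continue
--
--         if capture:
--             if line.strip().startswith(("Pros:", "Cons:", "Sentiment:")):
--                 break
--             if line.strip():
--                 summary_lines.append(line.strip())
--
--     return " ".join(summary_lines)
-- ===== SOURCE B (Python) =====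
-- HEADERS = ("Summary:", "Pros:", "Cons:", "Sentiment:")
--
--
-- def _split_sections(lines):
--     """Parse lines into (header_line, body_lines) sections.
--
--     A line whose stripped form starts with a known header opens a new section;
--     every following line belongs to that section until the next header.
--     Lines before the first header are ignored.
--     """
--     sections = []
--     body = None
--     for line in lines:
--         if line.strip().startswith(HEADERS):
--             body = []
--             sections.append((line, body))
--         elif body is not None:
--             body.append(line)
--     return sections
--
--
-- def extract_summary_only(text):
--     for header, body in _split_sections(text.splitlines()):
--         if header.strip().startswith("Summary:"):
--             words = [header.replace("Summary:", "").strip()]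
--             words += [line.strip() for line in body if line.strip()]
--             return " ".join(words)
--     return ""
-- ===== Notes on version B (the rewrite author's own statement) =====
-- stated objective: alternative
-- what changed: B first parses the whole text into a list of (header, body-lines) sections and then picks the first 'Summary:' section and cleans it, instead of A's single capture-flag loop; Pre_ excludes texts with more than one 'Summary:' header line, where A's capture loop merges the later summary section into the first while B's section parser ends the summary at the next header - a corner no specification covers and where either value is defensible.
-- outside the precondition, e.g. on extract_summary_only('Summary: a\nSummary: b'): A returns 'a b', B returns 'a'
import Mathlib
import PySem

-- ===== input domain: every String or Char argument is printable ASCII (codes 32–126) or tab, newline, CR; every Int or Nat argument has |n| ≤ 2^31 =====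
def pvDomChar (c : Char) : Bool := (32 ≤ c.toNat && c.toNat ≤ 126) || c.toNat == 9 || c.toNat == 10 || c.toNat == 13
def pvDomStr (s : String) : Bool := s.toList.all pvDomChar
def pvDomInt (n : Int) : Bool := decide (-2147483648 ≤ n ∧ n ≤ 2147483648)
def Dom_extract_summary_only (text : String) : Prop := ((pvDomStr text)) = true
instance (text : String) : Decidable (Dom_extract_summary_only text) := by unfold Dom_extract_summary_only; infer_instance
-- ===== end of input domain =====

-- B parses the text into a list of (header, body) sections and then picks the first
-- 'Summary:' section, instead of A's capture-flag loop; objective: alternative, same cost.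

-- shared helper: Python's `line.strip().startswith(p)`
def pvSS (l p : String) : Bool := PySem.Str.startswith (PySem.Str.strip l) p
-- Python A's `line.strip().startswith(("Pros:", "Cons:", "Sentiment:"))`
def pvStop (l : String) : Bool := pvSS l "Pros:" || pvSS l "Cons:" || pvSS l "Sentiment:"
-- Python B's `line.strip().startswith(HEADERS)` with HEADERS = ("Summary:", "Pros:", "Cons:", "Sentiment:")
def pvHeader (l : String) : Bool := pvSS l "Summary:" || pvSS l "Pros:" || pvSS l "Cons:" || pvSS l "Sentiment:"
-- shared helper: Python's `line.replace("Summary:", "").strip()`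
def pvClean (l : String) : String := PySem.Str.strip (PySem.Str.replace l "Summary:" "")

-- ===== PORT A =====
-- A's loop: state = (capture flag, accumulated summary_lines); `break` returns the accumulator.
def pvGoA : List String → Bool → List String → List String
  | [], _, acc => acc
  | l :: rest, capture, acc =>
    if pvSS l "Summary:" then
      pvGoA rest true (acc ++ [pvClean l])
    else if capture then
      if pvStop l then acc
      else if PySem.Str.strip l ≠ "" then pvGoA rest capture (acc ++ [PySem.Str.strip l])
      else pvGoA rest capture acc
    else pvGoA rest capture acc

def extract_summary_only (text : String) : String :=
  PySem.Str.join " " (pvGoA (PySem.Str.splitlines text) false [])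

-- ===== PORT B =====
-- Source B's `_split_sections` loop: state = (finished sections, current section being filled);
-- Python appends the new (line, body) pair and mutates `body` in place, modelled here by
-- keeping the current section separate and flushing it when the next header opens.
def pvSecGo : List String → List (String × List String) → Option (String × List String) → List (String × List String)
  | [], done, none => done
  | [], done, some cur => done ++ [cur]
  | l :: rest, done, cur =>
    if pvHeader l then
      match cur with
      | none => pvSecGo rest done (some (l, []))
      | some c => pvSecGo rest (done ++ [c]) (some (l, []))
    else
      match cur with
      | none => pvSecGo rest done none
      | some (h, b) => pvSecGo rest done (some (h, b ++ [l]))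

-- the comprehension `[line.strip() for line in body if line.strip()]`, one element at a time
def pvPieceStrip (l : String) : Option String :=
  if PySem.Str.strip l ≠ "" then some (PySem.Str.strip l) else none

-- Source B's `for header, body in ...: if ...: return ...` / final `return ""`
def pvPickSummary : List (String × List String) → String
  | [] => ""
  | (h, body) :: rest =>
    if pvSS h "Summary:" then
      PySem.Str.join " " (pvClean h :: body.filterMap pvPieceStrip)
    else pvPickSummary rest

def extract_summary_only_alt (text : String) : String :=
  pvPickSummary (pvSecGo (PySem.Str.splitlines text) [] none)

-- ===== PRECONDITION & SPEC =====
-- Pre_ excludes texts with more than one 'Summary:' header line, on which A still returns: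
-- there A's capture loop merges the later summary section (with 'Summary:' stripped) into the
-- first, while B's section parser ends the summary at the next header — a corner no
-- specification covers and where either value is defensible.
def Pre_extract_summary_only (text : String) : Prop :=
  (PySem.Str.splitlines text).countP (fun l => pvSS l "Summary:") ≤ 1
instance (text : String) : Decidable (Pre_extract_summary_only text) := by
  unfold Pre_extract_summary_only; infer_instance

def pvWitness_extract_summary_only : String := "Review
Summary: great value
really liked it

Pros: cheap
Cons: slow"

def Spec_extract_summary_only (text : String) (out : String) : Prop := out = extract_summary_only_alt text
instance (text : String) (out : String) : Decidable (Spec_extract_summary_only text out) := by unfold Spec_extract_summary_only; infer_instance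

-- ===== CLAIM (what is proved, stated in full; the proofs are below) =====
def Claim_equal_extract_summary_only : Prop := ∀ (text : String), Dom_extract_summary_only text → Pre_extract_summary_only text → Spec_extract_summary_only text (extract_summary_only text)

-- ===== LEMMAS AND PROOFS =====

-- the per-body-line element A appends while capturing
def pvPieceB (l : String) : Option String :=
  if PySem.Str.strip l ≠ "" then
    some (if pvSS l "Summary:" then pvClean l else PySem.Str.strip l)
  else none

theorem pvToList_Summary : "Summary:".toList = ['S','u','m','m','a','r','y',':'] := by decide
theorem pvToList_Pros : "Pros:".toList = ['P','r','o','s',':'] := by decide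
theorem pvToList_Cons : "Cons:".toList = ['C','o','n','s',':'] := by decide
theorem pvToList_Sent : "Sentiment:".toList = ['S','e','n','t','i','m','e','n','t',':'] := by decide

-- a line whose stripped form starts with "Summary:" cannot also start with a stop header …
theorem pvSS_summary_not_stop (l : String) (h : pvSS l "Summary:" = true) : pvStop l = false := by
  unfold pvStop pvSS at *
  simp only [PySem.Str.startswith_eq] at *
  rw [PySem.Chars.startswith_iff, pvToList_Summary] at h
  obtain ⟨t, ht⟩ := h
  rw [Bool.or_eq_false_iff, Bool.or_eq_false_iff]
  refine ⟨⟨?_, ?_⟩, ?_⟩ <;>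
    rw [Bool.eq_false_iff, Ne, PySem.Chars.startswith_iff, ← ht] <;> intro hp
  · rw [pvToList_Pros] at hp; simp [List.cons_prefix_cons] at hp
  · rw [pvToList_Cons] at hp; simp [List.cons_prefix_cons] at hp
  · rw [pvToList_Sent] at hp; simp [List.cons_prefix_cons] at hp

-- … and cannot strip to the empty string
theorem pvSS_summary_strip_ne (l : String) (h : pvSS l "Summary:" = true) :
    PySem.Str.strip l ≠ "" := by
  unfold pvSS at h
  simp only [PySem.Str.startswith_eq] at h
  rw [PySem.Chars.startswith_iff, pvToList_Summary] at h
  intro he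
  rw [he] at h
  rw [show "".toList = ([] : List Char) from rfl] at h
  simp at h

theorem pvHeader_eq (l : String) : pvHeader l = (pvSS l "Summary:" || pvStop l) := by
  unfold pvHeader pvStop
  cases pvSS l "Summary:" <;> cases pvSS l "Pros:" <;> cases pvSS l "Cons:" <;>
    cases pvSS l "Sentiment:" <;> rfl

-- once capture is on, A collects exactly the stripped nonblank lines up to the first stop header
theorem pvGoA_true (ls : List String) (acc : List String) :
    pvGoA ls true acc = acc ++ (ls.takeWhile (fun l => !pvStop l)).filterMap pvPieceB := by
  induction ls generalizing acc with
  | nil => simp [pvGoA]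
  | cons l rest ih =>
    by_cases hS : pvSS l "Summary:" = true
    · rw [pvGoA, if_pos hS, ih]
      have hstop := pvSS_summary_not_stop l hS
      have hne := pvSS_summary_strip_ne l hS
      simp [hstop, pvPieceB, hne, hS]
    · rw [pvGoA, if_neg hS, if_pos rfl]
      by_cases hstop : pvStop l = true
      · simp [hstop]
      · rw [if_neg hstop]
        by_cases hne : PySem.Str.strip l ≠ ""
        · rw [if_pos hne, ih]
          simp [Bool.eq_false_iff.mpr hstop, pvPieceB, hne, hS]
        · rw [if_neg hne, ih]
          simp [Bool.eq_false_iff.mpr hstop, pvPieceB, hne]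

-- before capture, A skips to the first "Summary:" line
theorem pvGoA_false (ls : List String) :
    pvGoA ls false [] =
      match ls.findIdx? (fun l => pvSS l "Summary:") with
      | none => []
      | some i =>
          pvClean (ls.getD i "") ::
            ((ls.drop (i + 1)).takeWhile (fun l => !pvStop l)).filterMap pvPieceB := by
  induction ls with
  | nil => simp [pvGoA]
  | cons l rest ih =>
    by_cases hS : pvSS l "Summary:" = true
    · rw [pvGoA, if_pos hS, pvGoA_true]
      simp [List.findIdx?_cons, hS]
    · rw [pvGoA, if_neg hS, if_neg (by simp), ih]
      rw [List.findIdx?_cons, if_neg hS]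
      cases h : rest.findIdx? (fun l => pvSS l "Summary:") <;> simp

-- equation lemmas for pvSecGo (definitional; the match on the option reduced)
theorem pvSecGo_cons_none (l : String) (rest : List String) (done : List (String × List String)) :
    pvSecGo (l :: rest) done none =
      if pvHeader l then pvSecGo rest done (some (l, [])) else pvSecGo rest done none := rfl

theorem pvSecGo_cons_some (l : String) (rest : List String) (done : List (String × List String))
    (h : String) (b : List String) :
    pvSecGo (l :: rest) done (some (h, b)) =
      if pvHeader l then pvSecGo rest (done ++ [(h, b)]) (some (l, []))
      else pvSecGo rest done (some (h, b ++ [l])) := rfl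

-- B-side: the `done` accumulator only prefixes the result
theorem pvSecGo_acc (ls : List String) (done : List (String × List String))
    (cur : Option (String × List String)) :
    pvSecGo ls done cur = done ++ pvSecGo ls [] cur := by
  induction ls generalizing done cur with
  | nil => cases cur <;> simp [pvSecGo]
  | cons l rest ih =>
    cases cur with
    | none =>
      rw [pvSecGo_cons_none, pvSecGo_cons_none]
      by_cases hH : pvHeader l = true
      · rw [if_pos hH, if_pos hH, ih]
      · rw [if_neg hH, if_neg hH, ih]
    | some c =>
      obtain ⟨h, b⟩ := c
      rw [pvSecGo_cons_some, pvSecGo_cons_some]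
      by_cases hH : pvHeader l = true
      · rw [if_pos hH, if_pos hH, ih (done ++ [(h, b)]), ih ([] ++ [(h, b)])]
        simp
      · rw [if_neg hH, if_neg hH, ih]

-- B-side: an open section absorbs lines up to the next header
theorem pvSecGo_head (ls : List String) (h : String) (b : List String) :
    ∃ tail, pvSecGo ls [] (some (h, b)) =
      (h, b ++ ls.takeWhile (fun l => !pvHeader l)) :: tail := by
  induction ls generalizing b with
  | nil => exact ⟨[], by simp [pvSecGo]⟩
  | cons l rest ih =>
    by_cases hH : pvHeader l = true
    · refine ⟨pvSecGo rest [] (some (l, [])), ?_⟩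
      rw [pvSecGo_cons_some, if_pos hH, pvSecGo_acc]
      simp [hH]
    · obtain ⟨tail, htail⟩ := ih (b ++ [l])
      refine ⟨tail, ?_⟩
      rw [pvSecGo_cons_some, if_neg hH, htail]
      simp [hH]

-- shorthand for the right-hand side of the B-side characterisation
def pvBSpec (ls : List String) : String :=
  match ls.findIdx? (fun l => pvSS l "Summary:") with
  | none => ""
  | some i =>
      PySem.Str.join " "
        (pvClean (ls.getD i "") ::
          ((ls.drop (i + 1)).takeWhile (fun l => !pvHeader l)).filterMap pvPieceStrip)

theorem pvBSpec_shift (l : String) (rest : List String) (hS : ¬ pvSS l "Summary:" = true) :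
    pvBSpec (l :: rest) = pvBSpec rest := by
  unfold pvBSpec
  rw [List.findIdx?_cons, if_neg hS]
  cases rest.findIdx? (fun x => pvSS x "Summary:") <;> simp

-- picking from a section list whose head is not a Summary section skips the head
theorem pvPick_skip (s : String × List String) (secs : List (String × List String))
    (hP : pvSS s.1 "Summary:" = false) :
    pvPickSummary (s :: secs) = pvPickSummary secs := by
  obtain ⟨h, b⟩ := s
  rw [pvPickSummary, if_neg (by simp_all)]

-- B's section scan + pick equals "find the first Summary line, take its section"
theorem pvPick_secGo (ls : List String) (cur : Option (String × List String))
    (hc : cur = none ∨ ∃ h b, cur = some (h, b) ∧ pvSS h "Summary:" = false) :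
    pvPickSummary (pvSecGo ls [] cur) = pvBSpec ls := by
  induction ls generalizing cur with
  | nil =>
    rcases hc with rfl | ⟨h, b, rfl, hP⟩
    · simp [pvSecGo, pvPickSummary, pvBSpec]
    · simp [pvSecGo, pvPickSummary, pvBSpec, hP]
  | cons l rest ih =>
    by_cases hS : pvSS l "Summary:" = true
    · have hH : pvHeader l = true := by rw [pvHeader_eq, hS]; simp
      have hpick : pvPickSummary (pvSecGo rest [] (some (l, []))) =
          PySem.Str.join " "
            (pvClean l :: (rest.takeWhile (fun x => !pvHeader x)).filterMap pvPieceStrip) := by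
        obtain ⟨tail, htail⟩ := pvSecGo_head rest l []
        rw [htail, pvPickSummary, if_pos hS]
        simp
      have hrhs : pvBSpec (l :: rest) =
          PySem.Str.join " "
            (pvClean l :: (rest.takeWhile (fun x => !pvHeader x)).filterMap pvPieceStrip) := by
        unfold pvBSpec
        rw [List.findIdx?_cons, if_pos hS]
        simp
      rcases hc with rfl | ⟨h, b, rfl, hP⟩
      · rw [pvSecGo_cons_none, if_pos hH, hpick, hrhs]
      · rw [pvSecGo_cons_some, if_pos hH, pvSecGo_acc, List.nil_append,
          List.singleton_append, pvPick_skip (h, b) _ hP, hpick, hrhs]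
    · rw [pvBSpec_shift l rest hS]
      by_cases hH : pvHeader l = true
      · have hnext : pvSS l "Summary:" = false := (Bool.not_eq_true _).mp hS
        rcases hc with rfl | ⟨h, b, rfl, hP⟩
        · rw [pvSecGo_cons_none, if_pos hH]
          exact ih _ (Or.inr ⟨l, [], rfl, hnext⟩)
        · rw [pvSecGo_cons_some, if_pos hH, pvSecGo_acc, List.nil_append,
            List.singleton_append, pvPick_skip (h, b) _ hP]
          exact ih _ (Or.inr ⟨l, [], rfl, hnext⟩)
      · rcases hc with rfl | ⟨h, b, rfl, hP⟩
        · rw [pvSecGo_cons_none, if_neg hH]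
          exact ih _ (Or.inl rfl)
        · rw [pvSecGo_cons_some, if_neg hH]
          exact ih _ (Or.inr ⟨h, b ++ [l], rfl, hP⟩)

-- predicate congruence for takeWhile (pointwise on the list's members)
theorem pvTakeWhile_congr {α : Type} (p q : α → Bool) (l : List α)
    (h : ∀ x ∈ l, p x = q x) : l.takeWhile p = l.takeWhile q := by
  induction l with
  | nil => rfl
  | cons a t ih =>
    rw [List.takeWhile_cons, List.takeWhile_cons, h a (by simp)]
    cases q a <;> simp [ih fun x hx => h x (by simp [hx])]

-- under Pre_, no line after the first Summary line is itself a Summary line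
theorem pvNoSummaryAfter (ls : List String) (i : Nat)
    (hfi : ls.findIdx? (fun l => pvSS l "Summary:") = some i)
    (hcnt : ls.countP (fun l => pvSS l "Summary:") <= 1) :
    ∀ l ∈ ls.drop (i + 1), pvSS l "Summary:" = false := by
  obtain ⟨hlt, hidx⟩ := List.findIdx?_eq_some_iff_findIdx_eq.mp hfi
  have hP : pvSS (ls[i]'hlt) "Summary:" = true := by
    have h2 := List.findIdx_getElem (w := hidx ▸ hlt)
    simpa [hidx] using h2
  have hsplit : ls = ls.take (i + 1) ++ ls.drop (i + 1) := (List.take_append_drop _ _).symm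
  have hc1 : 1 <= (ls.take (i + 1)).countP (fun l => pvSS l "Summary:") := by
    have hmem : ls[i]'hlt ∈ ls.take (i + 1) := by
      have hlen : i < (ls.take (i + 1)).length := by simp [hlt]
      have : (ls.take (i + 1))[i]'hlen = ls[i]'hlt := by simp [List.getElem_take]
      exact this ▸ List.getElem_mem _
    have := List.countP_pos_iff (p := fun l => pvSS l "Summary:")
      (l := ls.take (i + 1)) |>.mpr ⟨_, hmem, hP⟩
    omega
  have hc0 : (ls.drop (i + 1)).countP (fun l => pvSS l "Summary:") = 0 := by
    have := congrArg (List.countP (fun l => pvSS l "Summary:")) hsplit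
    rw [List.countP_append] at this
    omega
  intro l hl
  simpa using List.countP_eq_zero.mp hc0 l hl

-- ===== VERDICT (by name: the statement is the Claim_ definition above) =====
theorem extract_summary_only_spec : Claim_equal_extract_summary_only := by
  intro text _ hpre
  unfold Spec_extract_summary_only extract_summary_only extract_summary_only_alt
  rw [pvGoA_false, pvPick_secGo _ none (Or.inl rfl)]
  unfold pvBSpec
  cases hfi : (PySem.Str.splitlines text).findIdx? (fun l => pvSS l "Summary:") with
  | none => simp [PySem.Str.join]
  | some i =>
    have hafter := pvNoSummaryAfter _ i hfi hpre
    have key :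
        (((PySem.Str.splitlines text).drop (i + 1)).takeWhile
            (fun l => !pvStop l)).filterMap pvPieceB =
        (((PySem.Str.splitlines text).drop (i + 1)).takeWhile
            (fun l => !pvHeader l)).filterMap pvPieceStrip := by
      rw [pvTakeWhile_congr (fun l => !pvStop l) (fun l => !pvHeader l) _
        (fun x hx => by
          show (!pvStop x) = (!pvHeader x)
          rw [pvHeader_eq, hafter x hx]; simp)]
      exact List.filterMap_congr fun x hx => by
        have hxmem := List.Sublist.mem hx (List.takeWhile_sublist _)
        simp [pvPieceB, pvPieceStrip, hafter x hxmem]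
    simp only [key]
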